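-- pv_equiv track=rewrite | github.com/hpaliwal4/krazimo-assignment-1 | intelligent-code-reviewer/backend/app/playbooks/base_playbook.py | _analyze_code_metrics
-- ===== SOURCE A (Python) =====
-- from typing import Dict, List, Any, Optional
--
-- def _analyze_code_metrics(
--
--     content: str
-- ) -> Dict[str, Any]:
--     """
--     Analyze basic code metrics for content.
--
--     Args:
--         content: Code content to analyze
--
--     Returns:
--         Dictionary with basic metrics
--     """
--     lines = content.split('\n')
--     non_empty_lines = [line for line in lines if line.strip()]
--
--     return {
--         "total_lines": len(lines),
--         "code_lines": len(non_empty_lines),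
--         "comment_lines": len([line for line in lines if line.strip().startswith('#') or line.strip().startswith('//')]),
--         "blank_lines": len(lines) - len(non_empty_lines),
--         "method_count": content.count('def '),
--         "class_count": content.count('class '),
--         "function_count": content.count('function '),
--         "complexity_indicators": content.count('if ') + content.count('for ') + content.count('while '),
--         "import_count": content.count('import ') + content.count('from ')
--     }
-- ===== SOURCE B (Python) =====
-- def _analyze_code_metrics(content):
--     lines = content.split('\n')
--     code = 0
--     comment = 0
--     for line in lines:
--         s = line.strip()
--         if s:
--             code += 1
--         if s.startswith('#') or s.startswith('//'):
--             comment += 1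
--     d = 0; c = 0; f = 0; cx = 0; im = 0
--     for i in range(len(content)):
--         if content.startswith('def ', i): d += 1
--         if content.startswith('class ', i): c += 1
--         if content.startswith('function ', i): f += 1
--         if content.startswith('if ', i): cx += 1
--         if content.startswith('for ', i): cx += 1
--         if content.startswith('while ', i): cx += 1
--         if content.startswith('import ', i): im += 1
--         if content.startswith('from ', i): im += 1
--     return {
--         "total_lines": len(lines),
--         "code_lines": code,
--         "comment_lines": comment,
--         "blank_lines": len(lines) - code,
--         "method_count": d,
--         "class_count": c,
--         "function_count": f,
--         "complexity_indicators": cx,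
--         "import_count": im,
--     }
-- ===== Notes on version B (the rewrite author's own statement) =====
-- stated objective: alternative
-- what changed: A builds three list comprehensions over the lines and makes nine separate whole-string .count scans; B makes one fold over the lines maintaining code/comment counters and one single left-to-right scan over the text that checks every keyword at each position.
import Mathlib
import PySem

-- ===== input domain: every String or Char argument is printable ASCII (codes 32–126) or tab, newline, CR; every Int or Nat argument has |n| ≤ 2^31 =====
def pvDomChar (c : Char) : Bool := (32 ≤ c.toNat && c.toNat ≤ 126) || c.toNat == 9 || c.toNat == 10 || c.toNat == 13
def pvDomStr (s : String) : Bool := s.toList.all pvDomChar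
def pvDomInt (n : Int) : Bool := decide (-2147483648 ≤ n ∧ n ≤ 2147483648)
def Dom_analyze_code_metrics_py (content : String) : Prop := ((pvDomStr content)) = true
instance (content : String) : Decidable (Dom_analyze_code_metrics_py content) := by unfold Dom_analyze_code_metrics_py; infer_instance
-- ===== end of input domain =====

-- B replaces A's three list comprehensions and nine whole-string .count scans by one fold
-- over the lines and one single left-to-right scan over the text checking every keyword at
-- each position (objective: alternative single-pass decomposition, not claimed faster).

-- ===== PORT A =====
-- content.split('\n') never raises (separator nonempty), so split? is always `some`.
def analyze_code_metrics_py (content : String) : List (String × Int) :=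
  let lines := (PySem.Str.split? content "\n").getD []
  let non_empty_lines := lines.filter (fun line => !(PySem.Str.strip line == ""))
  [("total_lines", (lines.length : Int)),
   ("code_lines", (non_empty_lines.length : Int)),
   ("comment_lines", ((lines.filter (fun line =>
        PySem.Str.startswith (PySem.Str.strip line) "#" ||
        PySem.Str.startswith (PySem.Str.strip line) "//")).length : Int)),
   ("blank_lines", (lines.length : Int) - (non_empty_lines.length : Int)),
   ("method_count", (PySem.Str.count content "def " : Int)),
   ("class_count", (PySem.Str.count content "class " : Int)),
   ("function_count", (PySem.Str.count content "function " : Int)),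
   ("complexity_indicators", (PySem.Str.count content "if " : Int) +
      (PySem.Str.count content "for " : Int) + (PySem.Str.count content "while " : Int)),
   ("import_count", (PySem.Str.count content "import " : Int) +
      (PySem.Str.count content "from " : Int))]

-- ===== PORT B =====
-- B's first loop: one pass over the lines maintaining (code, comment) counters.
def lineScan : List String → Int → Int → Int × Int
  | [], code, comment => (code, comment)
  | line :: rest, code, comment =>
      let s := PySem.Str.strip line
      lineScan rest
        (if !(s == "") then code + 1 else code)
        (if PySem.Str.startswith s "#" || PySem.Str.startswith s "//" then comment + 1 else comment)

-- B's second loop: 'for i in range(len(content)): if content.startswith(pat, i): …' —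
-- content.startswith(pat, i) is exactly pat.isPrefixOf (drop i content), so the loop is a
-- recursion over the nonempty tails of the character list (exact: patterns are nonempty,
-- so position len(content) can never match).
def kwScan : List Char → Int × Int × Int × Int × Int → Int × Int × Int × Int × Int
  | [], acc => acc
  | c :: t, (d, cl, f, cx, im) =>
      let l := c :: t
      kwScan t
        ((if "def ".toList.isPrefixOf l then d + 1 else d),
         (if "class ".toList.isPrefixOf l then cl + 1 else cl),
         (if "function ".toList.isPrefixOf l then f + 1 else f),
         (if "while ".toList.isPrefixOf l then
            (if "for ".toList.isPrefixOf l then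
               (if "if ".toList.isPrefixOf l then cx + 1 else cx) + 1 else
               (if "if ".toList.isPrefixOf l then cx + 1 else cx)) + 1
          else
            (if "for ".toList.isPrefixOf l then
               (if "if ".toList.isPrefixOf l then cx + 1 else cx) + 1 else
               (if "if ".toList.isPrefixOf l then cx + 1 else cx))),
         (if "from ".toList.isPrefixOf l then
            (if "import ".toList.isPrefixOf l then im + 1 else im) + 1 else
            (if "import ".toList.isPrefixOf l then im + 1 else im)))

def analyze_code_metrics_py_alt (content : String) : List (String × Int) :=
  let lines := (PySem.Str.split? content "\n").getD []
  let lc := lineScan lines 0 0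
  let kw := kwScan content.toList (0, 0, 0, 0, 0)
  [("total_lines", (lines.length : Int)),
   ("code_lines", lc.1),
   ("comment_lines", lc.2),
   ("blank_lines", (lines.length : Int) - lc.1),
   ("method_count", kw.1),
   ("class_count", kw.2.1),
   ("function_count", kw.2.2.1),
   ("complexity_indicators", kw.2.2.2.1),
   ("import_count", kw.2.2.2.2)]

-- ===== PRECONDITION & SPEC =====
def Spec_analyze_code_metrics_py (content : String) (out : List (String × Int)) : Prop := out = analyze_code_metrics_py_alt content
instance (content : String) (out : List (String × Int)) : Decidable (Spec_analyze_code_metrics_py content out) := by unfold Spec_analyze_code_metrics_py; infer_instance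

-- ===== CLAIM (what is proved, stated in full; the proofs are below) =====
def Claim_equal_analyze_code_metrics_py : Prop := ∀ (content : String), Dom_analyze_code_metrics_py content → Spec_analyze_code_metrics_py content (analyze_code_metrics_py content)

-- ===== LEMMAS AND PROOFS =====

-- Number of positions (tails) of a list at which `sub` occurs.
def cnt (sub : List Char) : List Char → Nat
  | [] => 0
  | c :: t => (if sub.isPrefixOf (c :: t) then 1 else 0) + cnt sub t

-- Each search pattern is a space-free word followed by one space (hence it cannot overlap itself).
def KwShape (sub : List Char) : Prop := ∃ w, sub = w ++ [' '] ∧ ' ' ∉ w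

lemma no_space_of_short_prefix {w u : List Char} (hw : ' ' ∉ w)
    (h : u <+: w ++ [' ']) (hl : u.length ≤ w.length) : ' ' ∉ u := by
  obtain ⟨r, hr⟩ := h
  have hu : u = (w ++ [' ']).take u.length := by
    rw [← hr, List.take_append_of_le_length (by simp)]
    simp
  rw [List.take_append_of_le_length hl] at hu
  intro hmem
  exact hw (List.take_subset _ _ (hu ▸ hmem))

lemma not_prefix_mid {sub u : List Char} (hsub : KwShape sub)
    (hu : u <:+ sub) (hne : u ≠ []) (hlt : u.length < sub.length) (r : List Char) :
    ¬ sub.isPrefixOf (u ++ r) := by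
  obtain ⟨w, hw, hsp⟩ := hsub
  intro h
  rw [List.isPrefixOf_iff_prefix] at h
  have hup : u <+: sub :=
    List.prefix_of_prefix_length_le (List.prefix_append u r) h (le_of_lt hlt)
  have hlen : u.length ≤ w.length := by
    have := hlt; rw [hw] at this; simp at this; omega
  have hnosp : ' ' ∉ u := no_space_of_short_prefix hsp (hw ▸ hup) hlen
  -- but a nonempty suffix of sub contains sub's last char, which is ' '
  obtain ⟨v, hv⟩ := hu
  have hlast : ' ' ∈ sub := by rw [hw]; simp
  rw [← hv] at hlast
  rcases List.mem_append.mp hlast with hmv | hmu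
  · -- ' ' ∈ v, but v is a short prefix of sub too
    have hvp : v <+: sub := ⟨u, hv⟩
    have hvl : v.length ≤ w.length := by
      have : v.length + u.length = sub.length := by rw [← hv]; simp
      have : sub.length = w.length + 1 := by rw [hw]; simp
      have hupos : 0 < u.length := List.length_pos_iff.mpr hne
      omega
    exact no_space_of_short_prefix hsp (hw ▸ hvp) hvl hmv
  · exact hnosp hmu

lemma cnt_suffix_append {sub u : List Char} (hsub : KwShape sub)
    (hu : u <:+ sub) (hlt : u.length < sub.length) (r : List Char) :
    cnt sub (u ++ r) = cnt sub r := by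
  induction u with
  | nil => simp
  | cons c t ih =>
      have hnp := not_prefix_mid hsub hu (by simp) hlt r
      have ht : t <:+ sub := (List.suffix_cons c t).trans hu
      have htl : t.length < sub.length := by simp at hlt ⊢; omega
      simp only [List.cons_append, cnt]
      rw [if_neg (by simpa using hnp)]
      simpa using ih ht htl

lemma cnt_drop_of_prefix {sub l : List Char} (hsub : KwShape sub)
    (h : sub.isPrefixOf l = true) : cnt sub l = 1 + cnt sub (l.drop sub.length) := by
  rw [List.isPrefixOf_iff_prefix] at h
  obtain ⟨r, hr⟩ := h
  subst hr
  rw [List.drop_left]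
  obtain ⟨w, hw, hsp⟩ := hsub
  have hne : sub ≠ [] := by rw [hw]; simp
  obtain ⟨c, t, hct⟩ := List.exists_cons_of_ne_nil hne
  have h1 : cnt sub (sub ++ r) = 1 + cnt sub (t ++ r) := by
    rw [hct]; simp only [List.cons_append, cnt]
    rw [if_pos (by rw [List.isPrefixOf_iff_prefix, ← List.cons_append, ← hct]
                   exact List.prefix_append sub r)]
  rw [h1, cnt_suffix_append ⟨w, hw, hsp⟩ (by rw [hct]; exact List.suffix_cons c t)
        (by rw [hct]; simp)]

lemma count_go_eq_cnt {sub : List Char} (hsub : KwShape sub) :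
    ∀ fuel l acc, l.length ≤ fuel → PySem.Chars.count.go sub fuel l acc = acc + cnt sub l := by
  intro fuel
  induction fuel with
  | zero => intro l acc h; interval_cases hl : l.length
            · rw [List.length_eq_zero_iff.mp hl]; simp [PySem.Chars.count.go, cnt]
  | succ n ih =>
      intro l acc h
      match l with
      | [] => simp [PySem.Chars.count.go, cnt]
      | c :: t =>
          rw [PySem.Chars.count.go]
          by_cases hp : sub.isPrefixOf (c :: t) = true
          · rw [if_pos hp]
            have hslen : 1 ≤ sub.length := by
              obtain ⟨w, hw, _⟩ := hsub; rw [hw]; simp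
            rw [ih _ _ (by simp at h ⊢; omega)]
            rw [cnt_drop_of_prefix hsub hp]
            omega
          · rw [if_neg hp]
            rw [ih _ _ (by simp at h; omega)]
            simp only [cnt]
            rw [if_neg hp]
            omega

lemma count_eq_cnt {sub : List Char} (hsub : KwShape sub) (s : List Char) :
    PySem.Chars.count s sub = cnt sub s := by
  have hne : ¬ sub.isEmpty = true := by
    obtain ⟨w, hw, _⟩ := hsub; rw [hw]; simp
  rw [PySem.Chars.count, if_neg hne, count_go_eq_cnt hsub s.length s 0 le_rfl]
  omega

lemma lineScan_eq : ∀ (lines : List String) (code comment : Int),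
    lineScan lines code comment =
      (code + ((lines.filter (fun line => !(PySem.Str.strip line == ""))).length : Int),
       comment + ((lines.filter (fun line =>
          PySem.Str.startswith (PySem.Str.strip line) "#" ||
          PySem.Str.startswith (PySem.Str.strip line) "//")).length : Int)) := by
  intro lines
  induction lines with
  | nil => intro code comment; simp [lineScan]
  | cons line rest ih =>
      intro code comment
      rw [lineScan, ih]
      simp only [List.filter_cons]
      split_ifs <;> (refine Prod.ext ?_ ?_ <;> simp <;> omega)

lemma kwScan_eq : ∀ (l : List Char) (d cl f cx im : Int),
    kwScan l (d, cl, f, cx, im) =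
      (d + (cnt "def ".toList l : Int),
       cl + (cnt "class ".toList l : Int),
       f + (cnt "function ".toList l : Int),
       cx + (cnt "if ".toList l : Int) + (cnt "for ".toList l : Int) + (cnt "while ".toList l : Int),
       im + (cnt "import ".toList l : Int) + (cnt "from ".toList l : Int)) := by
  intro l
  induction l with
  | nil => intro d cl f cx im; simp [kwScan, cnt]
  | cons c t ih =>
      intro d cl f cx im
      rw [kwScan, ih]
      simp only [cnt]
      refine Prod.ext ?_ (Prod.ext ?_ (Prod.ext ?_ (Prod.ext ?_ ?_))) <;>
        (simp only []; split_ifs <;> (push_cast; ring))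

lemma shape_def : KwShape "def ".toList := ⟨['d','e','f'], by decide, by decide⟩
lemma shape_class : KwShape "class ".toList := ⟨['c','l','a','s','s'], by decide, by decide⟩
lemma shape_function : KwShape "function ".toList :=
  ⟨['f','u','n','c','t','i','o','n'], by decide, by decide⟩
lemma shape_if : KwShape "if ".toList := ⟨['i','f'], by decide, by decide⟩
lemma shape_for : KwShape "for ".toList := ⟨['f','o','r'], by decide, by decide⟩
lemma shape_while : KwShape "while ".toList := ⟨['w','h','i','l','e'], by decide, by decide⟩
lemma shape_import : KwShape "import ".toList :=
  ⟨['i','m','p','o','r','t'], by decide, by decide⟩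
lemma shape_from : KwShape "from ".toList := ⟨['f','r','o','m'], by decide, by decide⟩

-- ===== VERDICT (by name: the statement is the Claim_ definition above) =====
theorem analyze_code_metrics_py_spec : Claim_equal_analyze_code_metrics_py := by
  intro content _
  unfold Spec_analyze_code_metrics_py
  simp only [analyze_code_metrics_py, analyze_code_metrics_py_alt, lineScan_eq, kwScan_eq,
    PySem.Str.count,
    count_eq_cnt shape_def, count_eq_cnt shape_class, count_eq_cnt shape_function,
    count_eq_cnt shape_if, count_eq_cnt shape_for, count_eq_cnt shape_while,
    count_eq_cnt shape_import, count_eq_cnt shape_from]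
  norm_num
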